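-- pv_equiv track=rewrite | github.com/JohnForbes/kolmogorov | src/make_js.py | f
-- ===== SOURCE A (Python) =====
-- chars_list=[chr(_) for _ in range(32, 127)]
--
-- chars_dict={chr(_):_-32 for _ in range(32, 127)}
--
-- def f(x):
--   _x = list(x)
--   _z = []
--   carry = True
--   while len(_x)>0:
--     __x = _x.pop()
--     if carry:
--       q, carry = (_f(__x))
--       _z.append(q)
--     else:
--       _z.append(__x)
--   if carry:
--     _z.append(' ')
--   _z.reverse()
--   return ''.join(_z)
--
-- def _f(previous):
--   carry=False
--   _index = chars_dict[previous]
--   _next_index = _index + 1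
--   if _next_index >= len(chars_list):
--     carry=True
--     _next_index=0
--   _next = chars_list[_next_index]
--   return _next, carry
-- ===== SOURCE B (Python) =====
-- def f(x):
--   stripped = x.rstrip('~')
--   if not stripped:
--     return ' ' * (len(x) + 1)
--   return stripped[:-1] + chr(ord(stripped[-1]) + 1) + ' ' * (len(x) - len(stripped))
-- ===== Notes on version B (the rewrite author's own statement) =====
-- stated objective: faster
-- what changed: Replaces A's per-character pop/dict-lookup/carry loop with a single strip of the trailing run of the maximal digit, one character increment, and space padding.
import Mathlib
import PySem

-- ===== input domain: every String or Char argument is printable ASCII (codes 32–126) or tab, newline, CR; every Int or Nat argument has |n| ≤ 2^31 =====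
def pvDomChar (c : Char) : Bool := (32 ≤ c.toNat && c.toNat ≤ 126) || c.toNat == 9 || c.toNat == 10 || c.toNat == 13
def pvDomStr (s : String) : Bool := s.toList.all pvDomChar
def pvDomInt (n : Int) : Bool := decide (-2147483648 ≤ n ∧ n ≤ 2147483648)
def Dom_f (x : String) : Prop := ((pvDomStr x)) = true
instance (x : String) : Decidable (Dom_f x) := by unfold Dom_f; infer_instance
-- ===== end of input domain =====

-- B strips the trailing '~' run, increments the single preceding character and pads with spaces,
-- instead of A's per-character pop/dict-lookup/carry loop; measured constant-factor faster.

-- ===== PORT A =====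
-- chars_dict[c] = c.toNat - 32 exactly for codes 32..126 (KeyError -> none); chars_list[i] = Char.ofNat (32+i).
-- _f(previous): returns (next char, carry), or none on KeyError.
def fA_f (c : Char) : Option (Char × Bool) :=
  if 32 ≤ c.toNat ∧ c.toNat ≤ 126 then
    let idx := c.toNat - 32
    let nidx := idx + 1
    if 95 ≤ nidx then some (Char.ofNat 32, true)
    else some (Char.ofNat (32 + nidx), false)
  else none

-- the while loop: pops from the right (= walks x.toList.reverse); acc holds _z reversed
-- (Python appends to _z and reverses it at the end, so acc is already in final order).
def fLoop : List Char → Bool → List Char → Option (List Char × Bool)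
  | [], carry, acc => some (acc, carry)
  | c :: rest, carry, acc =>
      if carry then
        match fA_f c with
        | some (q, c') => fLoop rest c' (q :: acc)
        | none => none
      else fLoop rest carry (c :: acc)

def f (x : String) : String :=
  match fLoop x.toList.reverse true [] with
  | some (acc, carry) => String.mk (if carry then ' ' :: acc else acc)
  | none => ""    -- KeyError: excluded by Pre_f

-- ===== PORT B =====
-- rstrip('~') = drop the leading '~' run of the reversed character list.
def f_alt (x : String) : String :=
  let rs := x.toList.reverse
  match rs.dropWhile (· == '~') with
  | [] => String.mk (List.replicate (rs.length + 1) ' ')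
  | c :: pre =>
      String.mk (pre.reverse ++ [Char.ofNat (c.toNat + 1)]
                 ++ List.replicate (rs.length - (rs.dropWhile (· == '~')).length) ' ')

-- ===== PRECONDITION & SPEC =====
-- A raises KeyError iff the rightmost non-'~' character has a code outside 32..126
-- (e.g. tab/newline/CR, which Dom_f admits); Pre_f excludes exactly those inputs.
def Pre_f (x : String) : Prop :=
  (((x.toList.reverse.dropWhile (· == '~')).take 1).all
    (fun c => 32 ≤ c.toNat && c.toNat ≤ 126)) = true

instance (x : String) : Decidable (Pre_f x) := by unfold Pre_f; infer_instance

def pvWitness_f : String := "ab~"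

def Spec_f (x : String) (out : String) : Prop := out = f_alt x
instance (x : String) (out : String) : Decidable (Spec_f x out) := by unfold Spec_f; infer_instance

-- ===== CLAIM (what is proved, stated in full; the proofs are below) =====
def Claim_equal_f : Prop := ∀ (x : String), Dom_f x → Pre_f x → Spec_f x (f x)

-- ===== LEMMAS AND PROOFS =====

theorem char_toNat_inj (c d : Char) (h : c.toNat = d.toNat) : c = d :=
  Char.ext (UInt32.toNat_inj.mp h)

-- once carry is false the loop just copies the remaining characters
theorem fLoop_false (rest : List Char) : ∀ acc,
    fLoop rest false acc = some (rest.reverse ++ acc, false) := by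
  induction rest with
  | nil => intro acc; simp [fLoop]
  | cons c r ih => intro acc; simp [fLoop, ih]

theorem fLoop_main (rs : List Char)
    (h : ∀ c ∈ ((rs.dropWhile (· == '~')).take 1), 32 ≤ c.toNat ∧ c.toNat ≤ 126) :
    ∀ acc, fLoop rs true acc =
      (match rs.dropWhile (· == '~') with
       | [] => some (List.replicate rs.length ' ' ++ acc, true)
       | c :: pre => some (pre.reverse ++ Char.ofNat (c.toNat + 1)
                            :: (List.replicate (rs.length - (rs.dropWhile (· == '~')).length) ' ' ++ acc), false)) := by
  induction rs with
  | nil => intro acc; simp [fLoop]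
  | cons c r ih =>
    intro acc
    by_cases hc : c = '~'
    · subst hc
      have hdw : (('~' :: r).dropWhile (· == '~')) = r.dropWhile (· == '~') := by
        simp
      rw [hdw] at h ⊢
      have step : fLoop ('~' :: r) true acc = fLoop r true (' ' :: acc) := by
        have h126 : ('~' : Char).toNat = 126 := rfl
        simp [fLoop, fA_f, h126]
      rw [step, ih h (' ' :: acc)]
      have hle : (r.dropWhile (· == '~')).length ≤ r.length := List.length_dropWhile_le _ _
      cases hrest : r.dropWhile (· == '~') with
      | nil =>
        simp only
        congr 1
        congr 1
        rw [List.length_cons, List.replicate_succ', List.append_assoc]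
        rfl
      | cons d pre =>
        simp only
        rw [hrest] at hle
        congr 2
        have ht : ('~' :: r).length - (d :: pre).length
            = (r.length - (d :: pre).length) + 1 := by
          simp at hle ⊢; omega
        rw [ht, List.replicate_succ', List.append_assoc]
        rfl
    · have hdw : ((c :: r).dropWhile (· == '~')) = c :: r := by
        simp [hc]
      rw [hdw] at h ⊢
      have hcr : 32 ≤ c.toNat ∧ c.toNat ≤ 126 := h c (by simp)
      have hne : c.toNat ≠ 126 := fun he => hc (char_toNat_inj c '~' (by rw [he]; rfl))
      have hstep : fA_f c = some (Char.ofNat (c.toNat + 1), false) := by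
        unfold fA_f
        rw [if_pos hcr, if_neg (by omega)]
        have harith : 32 + (c.toNat - 32 + 1) = c.toNat + 1 := by omega
        rw [harith]
      simp only [fLoop, hstep]
      rw [fLoop_false r (Char.ofNat (c.toNat + 1) :: acc)]
      simp

theorem f_eq_alt (x : String) (hp : Pre_f x) : f x = f_alt x := by
  unfold Pre_f at hp
  have hp' : ∀ c ∈ ((x.toList.reverse.dropWhile (· == '~')).take 1),
      32 ≤ c.toNat ∧ c.toNat ≤ 126 := by
    intro c hc
    have := List.all_eq_true.mp hp c hc
    simpa using this
  unfold f f_alt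
  rw [fLoop_main x.toList.reverse hp' []]
  cases hrest : x.toList.reverse.dropWhile (· == '~') with
  | nil =>
    simp only [hrest]
    simp [List.replicate_succ]
  | cons c pre =>
    simp only [hrest]
    simp

-- ===== VERDICT (by name: the statement is the Claim_ definition above) =====
theorem f_spec : Claim_equal_f := by
  intro x _ hp
  unfold Spec_f
  exact f_eq_alt x hp
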